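-- pv_equiv track=rewrite | github.com/baebaemin/Solved_Algorithm | 프로그래머스/unrated/172928. 공원 산책/공원 산책.py | solution
-- ===== SOURCE A (Python) =====
-- def solution(park, routes):
--     dir_dict = {'N': (-1, 0), 'S': (1, 0), 'W': (0, -1), 'E': (0, 1)}
--
--     # 출발 지점 탐색
--     r = c = 0
--     for y in range(len(park)):
--         for x in range(len(park[y])):
--             if park[y][x] == 'S':
--                 r, c = y, x
--                 break
--
--     for route in routes:    # 각 명령문별 방향 및 이동거리 추출
--         dr, dc = dir_dict[route[0]]
--         moves = int(route[2])
--
--         # park의 범위를 벗어나지 않는지 검사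
--         if 0 <= r + dr*moves < len(park) and 0 <= c + dc*moves < len(park[0]):
--             # 벗어나지 않는다면, 명령문별 도착지 좌표 설정
--             nr = r + dr*moves
--             nc = c + dc*moves
--             # 도착지로 이동 중 장애물을 만나지 않는지 검사
--             if all(park[r+i*dr][c+i*dc] != 'X' for i in range(1, moves+1)):
--                 r, c = nr, nc
--
--     answer = [r, c]
--     return answer
-- ===== SOURCE B (Python) =====
-- def solution(park, routes):
--     r = c = 0
--     for y in range(len(park)):
--         for x in range(len(park[y])):
--             if park[y][x] == 'S':
--                 r, c = y, x
--                 break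
--
--     def runs(cells):
--         # for each position, how many consecutive obstacle-free cells follow it
--         out = []
--         n = 0
--         for ch in reversed(cells):
--             out.append(n)
--             n = n + 1 if ch != 'X' else 0
--         out.reverse()
--         return out
--
--     # reach tables: for every cell, the number of consecutive in-bounds
--     # obstacle-free cells in each direction; each route is then one comparison
--     rows = [list(row) for row in park]
--     cols = [list(col) for col in zip(*rows)]
--     east = [runs(cells) for cells in rows]
--     west = [runs(cells[::-1])[::-1] for cells in rows]
--     south_t = [runs(cells) for cells in cols]
--     north_t = [runs(cells[::-1])[::-1] for cells in cols]
--     south = [[col[y] for col in south_t] for y in range(len(park))]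
--     north = [[col[y] for col in north_t] for y in range(len(park))]
--     reach = {'N': north, 'S': south, 'W': west, 'E': east}
--     delta = {'N': (-1, 0), 'S': (1, 0), 'W': (0, -1), 'E': (0, 1)}
--
--     for route in routes:
--         d = route[0]
--         moves = int(route[2])
--         if moves <= reach[d][r][c]:
--             dr, dc = delta[d]
--             r, c = r + dr * moves, c + dc * moves
--     return [r, c]
-- ===== Notes on version B (the rewrite author's own statement) =====
-- stated objective: alternative
-- what changed: A validates every route by computing a closed-form destination, testing its bounds, and then scanning all intermediate cells with an all()-comprehension; B instead precomputes four reach tables (for every cell, the number of consecutive in-bounds obstacle-free cells in each direction) with a backward run-length scan over each row and each transposed column, so each route becomes a single table comparison moves <= reach[d][r][c].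
-- outside the precondition, e.g. on solution(['OS', 'X'], ['N 0']): A returns [0, 1], B raises IndexError; on solution([''], ['E 1']): A returns [0, 0], B raises IndexError
import Mathlib
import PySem

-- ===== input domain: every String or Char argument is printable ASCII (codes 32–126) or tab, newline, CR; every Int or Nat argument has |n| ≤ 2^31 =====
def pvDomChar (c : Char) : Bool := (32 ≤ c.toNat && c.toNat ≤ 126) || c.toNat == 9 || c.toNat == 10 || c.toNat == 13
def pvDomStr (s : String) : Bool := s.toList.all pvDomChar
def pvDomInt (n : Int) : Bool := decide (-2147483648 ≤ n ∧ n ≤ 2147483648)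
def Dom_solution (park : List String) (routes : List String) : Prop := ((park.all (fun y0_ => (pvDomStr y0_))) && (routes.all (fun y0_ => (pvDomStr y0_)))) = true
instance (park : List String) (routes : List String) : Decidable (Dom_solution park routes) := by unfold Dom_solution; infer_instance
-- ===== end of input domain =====

-- B replaces A's per-route two-phase check (closed-form destination + endpoint bound test +
-- all()-scan of the intermediate cells) by four precomputed reach tables (per cell, the number of
-- consecutive in-bounds obstacle-free cells in each direction), built once by backward run-length
-- scans over the rows and the transposed columns; each route is then a single table comparison.
-- Objective: alternative (not claimed faster).

-- ===== PORT A =====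
-- len(park[0]) (both Pythons contain this exact expression); (pyGet? park 0).getD "" is park[0];
-- the getD is reached only when park = [], where Python raises IndexError — excluded by Pre_solution.
def pvL (park : List String) : Int := PySem.Str.len ((PySem.List.pyGet? park 0).getD "")

-- park[i][j] as A reads it (none = IndexError, excluded by Pre_solution)
def pvCell (park : List String) (i j : Int) : Option Char :=
  (PySem.List.pyGet? park i).bind (fun row => PySem.Str.pyGet? row j)

-- the start-point search: both Pythons carry this identical nested loop (inner loop breaks at
-- the first 'S' of the row; later rows overwrite), so the two ports share these two helpers
def pvRowScan : List Char → Int → Option Int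
  | [], _ => none
  | ch :: rest, x => if ch = 'S' then some x else pvRowScan rest (x + 1)

def pvStartScan : List String → Int → Int × Int → Int × Int
  | [], _, rc => rc
  | row :: rest, y, rc =>
      pvStartScan rest (y + 1)
        (match pvRowScan row.toList 0 with
         | some x => (y, x)
         | none => rc)

def pvDirDict : PySem.Dict Char (Int × Int) :=
  (((PySem.Dict.empty.insert 'N' ((-1 : Int), (0 : Int))).insert 'S' (1, 0)).insert 'W' (0, -1)).insert 'E' (0, 1)

-- dr, dc = dir_dict[route[0]]; moves = int(route[2])  (none = IndexError/KeyError/ValueError,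
-- all excluded by Pre_solution)
def pvParseA (route : String) : Option ((Int × Int) × Int) :=
  match PySem.Str.pyGet? route 0, PySem.Str.pyGet? route 2 with
  | some c0, some c2 =>
    match PySem.Dict.get? pvDirDict c0, PySem.Int.ofChars? [c2] with
    | some d, some m => some (d, m)
    | _, _ => none
  | _, _ => none

def pvStepA (park : List String) (rc : Int × Int) (route : String) : Int × Int :=
  match pvParseA route with
  | none => rc
  | some ((dr, dc), m) =>
    if 0 ≤ rc.1 + dr * m ∧ rc.1 + dr * m < PySem.List.len park ∧
       0 ≤ rc.2 + dc * m ∧ rc.2 + dc * m < pvL park then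
      if ((PySem.List.pyRange 1 (m + 1) 1).all
            (fun i => !(pvCell park (rc.1 + i * dr) (rc.2 + i * dc) == some 'X'))) = true then
        (rc.1 + dr * m, rc.2 + dc * m)
      else rc
    else rc

def solution (park : List String) (routes : List String) : List Int :=
  let s := pvStartScan park 0 (0, 0)
  let e := routes.foldl (pvStepA park) s
  [e.1, e.2]

-- ===== PORT B =====
-- the inner loop of runs(): walk the reversed cells, emitting the current run count
def pvRunsAux : Int → List Char → List Int
  | _, [] => []
  | n, ch :: rest => n :: pvRunsAux (if ch != 'X' then n + 1 else 0) rest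

-- runs(cells): for each position, how many consecutive obstacle-free cells follow it
def pvRuns (cells : List Char) : List Int := (pvRunsAux 0 cells.reverse).reverse

-- zip(*rows): hand-ported (PySem has no zip(*…)); stops at the shortest row exactly like
-- Python's zip; the fuel is the first row's length, an upper bound on the zip length
def pvZipStarGo : Nat → List (List Char) → List (List Char)
  | 0, _ => []
  | Nat.succ k, rows =>
    if rows.all (fun r => !r.isEmpty) then
      (rows.filterMap List.head?) :: pvZipStarGo k (rows.map List.tail)
    else []

def pvZipStar (rows : List (List Char)) : List (List Char) :=
  if rows.isEmpty then [] else pvZipStarGo (rows.headD []).length rows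

def pvDeltaDict : PySem.Dict Char (Int × Int) :=
  (((PySem.Dict.empty.insert 'N' ((-1 : Int), (0 : Int))).insert 'S' (1, 0)).insert 'W' (0, -1)).insert 'E' (0, 1)

-- reach = {'N': north, 'S': south, 'W': west, 'E': east}; the row-major rebuilds of north
-- and south read col[y] with y < len(col) always (each col has one entry per row), so the
-- port's getD default is never reached — exact
def pvReach (park : List String) : PySem.Dict Char (List (List Int)) :=
  let rows := park.map (fun row => row.toList)
  let cols := pvZipStar rows
  let east := rows.map (fun cells => pvRuns cells)
  let west := rows.map (fun cells => (pvRuns cells.reverse).reverse)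
  let southT := cols.map (fun cells => pvRuns cells)
  let northT := cols.map (fun cells => (pvRuns cells.reverse).reverse)
  let south := (List.range park.length).map (fun y => southT.map (fun col => col.getD y 0))
  let north := (List.range park.length).map (fun y => northT.map (fun col => col.getD y 0))
  ((((PySem.Dict.empty.insert 'N' north).insert 'S' south).insert 'W' west).insert 'E' east)

-- the route loop body: d = route[0]; moves = int(route[2]); if moves <= reach[d][r][c]: jump
def pvStepB (reach : PySem.Dict Char (List (List Int))) (rc : Int × Int) (route : String) : Int × Int :=
  match PySem.Str.pyGet? route 0, PySem.Str.pyGet? route 2 with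
  | some d, some c2 =>
    match PySem.Int.ofChars? [c2], PySem.Dict.get? reach d, PySem.Dict.get? pvDeltaDict d with
    | some m, some tab, some dd =>
      match (PySem.List.pyGet? tab rc.1).bind (fun row => PySem.List.pyGet? row rc.2) with
      | some v => if m ≤ v then (rc.1 + dd.1 * m, rc.2 + dd.2 * m) else rc
      | none => rc   -- IndexError; excluded by Pre_solution
    | _, _, _ => rc  -- ValueError / KeyError; excluded by Pre_solution
  | _, _ => rc       -- IndexError; excluded by Pre_solution

def solution_alt (park : List String) (routes : List String) : List Int :=
  let s := pvStartScan park 0 (0, 0)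
  let reach := pvReach park
  let e := routes.foldl (pvStepB reach) s
  [e.1, e.2]

-- ===== PRECONDITION & SPEC =====
-- With no routes both programs only run the start search, so any park is admitted.  With
-- routes, Pre_ excludes the inputs on which either Python raises: malformed routes (short,
-- unknown direction letter, non-digit at index 2 — A raises there), and empty, ragged or
-- zero-width parks, on which B's reach-table indexing raises IndexError (A raises on some of
-- these too, but returns on others) — see the cites in claim.json.
def Pre_solution (park : List String) (routes : List String) : Prop :=
  (∀ route ∈ routes,
    3 ≤ route.toList.length ∧
    route.toList[0]?.getD ' ' ∈ (['N', 'S', 'W', 'E'] : List Char) ∧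
    route.toList[2]?.getD ' ' ∈ (['0','1','2','3','4','5','6','7','8','9'] : List Char)) ∧
  (routes = [] ∨
    (park ≠ [] ∧ (∀ s ∈ park, PySem.Str.len s = pvL park) ∧ 0 < pvL park))

instance (park : List String) (routes : List String) : Decidable (Pre_solution park routes) := by
  unfold Pre_solution; infer_instance

def pvWitness_solution : List String × List String := (["SO", "OX"], ["E 1", "S 1"])

def Spec_solution (park : List String) (routes : List String) (out : List Int) : Prop := out = solution_alt park routes
instance (park : List String) (routes : List String) (out : List Int) : Decidable (Spec_solution park routes out) := by unfold Spec_solution; infer_instance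

-- ===== CLAIM (what is proved, stated in full; the proofs are below) =====
def Claim_equal_solution : Prop := ∀ (park : List String) (routes : List String), Dom_solution park routes → Pre_solution park routes → Spec_solution park routes (solution park routes)

-- ===== LEMMAS AND PROOFS =====


-- proof-side state invariant: the robot stands on a real cell of the park
def pvInv (park : List String) (rc : Int × Int) : Prop :=
  0 ≤ rc.1 ∧ rc.1 < (park.length : Int) ∧ 0 ≤ rc.2 ∧ rc.2 < pvL park

-- the condition under which A moves (bounds of the destination + obstacle-free path)
def pvCondA (park : List String) (r c dr dc m : Int) : Prop :=
  (0 ≤ r + dr * m ∧ r + dr * m < (park.length : Int) ∧ 0 ≤ c + dc * m ∧ c + dc * m < pvL park) ∧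
  ∀ i : Int, 1 ≤ i → i ≤ m → ¬ pvCell park (r + i * dr) (c + i * dc) = some 'X'

-- length of the all-true prefix; B's reach tables hold pvRun of the ray beyond each cell
def pvRun : List Bool → Int
  | [] => 0
  | b :: l => if b then pvRun l + 1 else 0

-- free[y][x] = (park[y][x] != 'X'), proof-side (A's cell tests and B's tables both reduce to it)
def pvFree (park : List String) : List (List Bool) :=
  park.map (fun row => row.toList.map (fun ch => ch != 'X'))

-- the reversed-or-forward column/row segment a table entry summarises
def pvStk (stk : List (List Bool)) (x : Nat) : List Bool :=
  stk.map (fun r => r[x]?.getD false)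

lemma pvStrLen (s : String) : PySem.Str.len s = (s.toList.length : Int) := by
  simp [PySem.Str.len_eq]

lemma pvGet2 (c0 c1 c2 : Char) (rest : List Char) :
    PySem.List.pyGet? (c0 :: c1 :: c2 :: rest) 2 = some c2 := by
  have h : (2 : Int) ≤ (rest.length : Int) + 1 + 1 := by omega
  simp [PySem.List.pyGet?, PySem.List.pyIdx?, h]

lemma pvRowScan_bounds : ∀ (cs : List Char) (k x : Int), pvRowScan cs k = some x → k ≤ x ∧ x < k + cs.length := by
  intro cs
  induction cs with
  | nil => intro k x h; simp [pvRowScan] at h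
  | cons ch rest ih =>
    intro k x h
    simp only [pvRowScan] at h
    split_ifs at h with hc
    · cases h
      refine ⟨le_refl _, ?_⟩
      simp only [List.length_cons]
      push_cast
      omega
    · have := ih (k + 1) x h
      simp only [List.length_cons] at *
      push_cast at this ⊢
      omega

lemma pvStartScan_inv (park : List String) :
    ∀ (rows : List String) (y : Int) (rc : Int × Int),
      (∀ s ∈ rows, PySem.Str.len s = pvL park) → 0 ≤ y → y + rows.length ≤ (park.length : Int) →
      pvInv park rc → pvInv park (pvStartScan rows y rc) := by
  intro rows
  induction rows with
  | nil => intro y rc _ _ _ h; exact h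
  | cons row rest ih =>
    intro y rc hlen hy0 hyn hinv
    simp only [pvStartScan]
    apply ih (y + 1)
    · intro s hs; exact hlen s (List.mem_cons_of_mem _ hs)
    · omega
    · simp only [List.length_cons] at hyn; push_cast at hyn ⊢; omega
    · rcases hscan : pvRowScan row.toList 0 with _ | x
      · exact hinv
      · have hb := pvRowScan_bounds row.toList 0 x hscan
        have hrow := hlen row List.mem_cons_self
        rw [pvStrLen] at hrow
        obtain ⟨hb1, hb2⟩ := hb
        show pvInv park (y, x)
        refine ⟨hy0, ?_, by omega, by omega⟩
        simp only [List.length_cons] at hyn; push_cast at hyn; omega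

lemma pvRun_nonneg (l : List Bool) : 0 ≤ pvRun l := by
  induction l with
  | nil => simp [pvRun]
  | cons b t ih => simp only [pvRun]; split_ifs <;> omega

lemma pvRun_le_iff (l : List Bool) (m : Int) (hm : 0 ≤ m) :
    m ≤ pvRun l ↔ (m ≤ (l.length : Int) ∧ ∀ i : Nat, (i : Int) < m → l[i]? = some true) := by
  induction l generalizing m with
  | nil =>
    constructor
    · intro h
      simp only [pvRun] at h
      exact ⟨by simpa using h, fun i hi => absurd hi (by omega)⟩
    · rintro ⟨h, _⟩; simpa [pvRun] using h
  | cons b t ih =>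
    by_cases hm0 : m ≤ 0
    · constructor
      · intro _
        refine ⟨by omega, fun i hi => absurd hi (by omega)⟩
      · intro _
        have := pvRun_nonneg (b :: t)
        omega
    · replace hm0 : 0 < m := by omega
      cases b
      · have hval : pvRun (false :: t) = 0 := by simp [pvRun]
        rw [hval]
        constructor
        · intro h; omega
        · rintro ⟨_, h2⟩
          have := h2 0 (by omega)
          simp at this
      · have hval : pvRun (true :: t) = pvRun t + 1 := by simp [pvRun]
        have key : m ≤ pvRun t + 1 ↔ m - 1 ≤ pvRun t := by omega
        rw [hval, key, ih (m - 1) (by omega)]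
        constructor
        · rintro ⟨h1, h2⟩
          refine ⟨by simp only [List.length_cons]; push_cast; omega, ?_⟩
          intro i hi
          cases i with
          | zero => rfl
          | succ j =>
            rw [List.getElem?_cons_succ]
            exact h2 j (by push_cast at hi ⊢; omega)
        · rintro ⟨h1, h2⟩
          refine ⟨by simp only [List.length_cons] at h1; push_cast at h1 ⊢; omega, ?_⟩
          intro j hj
          have := h2 (j + 1) (by push_cast at hj ⊢; omega)
          rwa [List.getElem?_cons_succ] at this

-- proof-side names for the tables solution_alt builds (definitionally the dict values of pvReach)
def pvRowsD (park : List String) : List (List Char) := park.map (fun row => row.toList)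
def pvColsD (park : List String) : List (List Char) := pvZipStar (pvRowsD park)
def pvEastB (park : List String) : List (List Int) := (pvRowsD park).map (fun cells => pvRuns cells)
def pvWestB (park : List String) : List (List Int) :=
  (pvRowsD park).map (fun cells => (pvRuns cells.reverse).reverse)
def pvSouthTB (park : List String) : List (List Int) := (pvColsD park).map (fun cells => pvRuns cells)
def pvNorthTB (park : List String) : List (List Int) :=
  (pvColsD park).map (fun cells => (pvRuns cells.reverse).reverse)
def pvSouthB (park : List String) : List (List Int) :=
  (List.range park.length).map (fun y => (pvSouthTB park).map (fun col => col.getD y 0))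
def pvNorthB (park : List String) : List (List Int) :=
  (List.range park.length).map (fun y => (pvNorthTB park).map (fun col => col.getD y 0))

lemma pvRunsAux_eq : ∀ (l : List Char) (pre : List Bool),
    pvRunsAux (pvRun pre) l
      = (List.range l.length).map
          (fun k => pvRun (((l.take k).reverse.map (fun ch => ch != 'X')) ++ pre)) := by
  intro l
  induction l with
  | nil => intro pre; simp [pvRunsAux]
  | cons ch rest ih =>
    intro pre
    simp only [pvRunsAux]
    have hw : (if ch != 'X' then pvRun pre + 1 else 0) = pvRun ((ch != 'X') :: pre) := by
      cases (ch != 'X') <;> simp [pvRun]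
    rw [hw, ih ((ch != 'X') :: pre)]
    simp only [List.length_cons]
    rw [List.range_succ_eq_map]
    simp [List.map_map, Function.comp_def, List.take_succ_cons, List.reverse_cons,
      List.append_assoc]

lemma pvRuns_length (cells : List Char) : (pvRuns cells).length = cells.length := by
  have h0 : (0 : Int) = pvRun [] := rfl
  rw [pvRuns, h0, pvRunsAux_eq cells.reverse []]
  simp

lemma pvRuns_get (cells : List Char) (x : Nat) (hx : x < cells.length) :
    (pvRuns cells)[x]? = some (pvRun ((cells.map (fun ch => ch != 'X')).drop (x + 1))) := by
  have h0 : (0 : Int) = pvRun [] := rfl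
  rw [pvRuns, h0, pvRunsAux_eq cells.reverse []]
  rw [List.getElem?_reverse (by simpa using hx)]
  simp only [List.length_map, List.length_range, List.length_reverse]
  rw [List.getElem?_eq_getElem (by simp; omega)]
  simp only [List.getElem_map, List.getElem_range, List.append_nil]
  have hseg : (cells.reverse.take (cells.length - 1 - x)).reverse = cells.drop (x + 1) := by
    rw [List.take_reverse, List.reverse_reverse]
    congr 1
    omega
  rw [hseg, List.map_drop]

lemma pvRunsRev_get (cells : List Char) (x : Nat) (hx : x < cells.length) :
    ((pvRuns cells.reverse).reverse)[x]?
      = some (pvRun (((cells.map (fun ch => ch != 'X')).take x).reverse)) := by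
  rw [List.getElem?_reverse (by simp [pvRuns_length]; omega)]
  simp only [pvRuns_length, List.length_reverse]
  rw [pvRuns_get cells.reverse (cells.length - 1 - x) (by simp; omega)]
  have hidx : (cells.map (fun ch => ch != 'X')).length - (cells.length - 1 - x + 1) = x := by
    simp only [List.length_map]; omega
  rw [List.map_reverse, List.drop_reverse, hidx]

lemma pvFilterHead (rows : List (List Char)) (h : ∀ r ∈ rows, r ≠ []) :
    rows.filterMap List.head? = rows.map (fun r => r.getD 0 ' ') := by
  induction rows with
  | nil => simp
  | cons r rest ih =>
    cases hr : r with
    | nil => exact absurd hr (h r List.mem_cons_self)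
    | cons a t =>
      simp only [List.filterMap_cons, List.map_cons]
      rw [ih (fun g hg => h g (List.mem_cons_of_mem _ hg))]
      simp [List.getD]

lemma pvZipStarGo_eq : ∀ (C : Nat) (rows : List (List Char)), (∀ r ∈ rows, r.length = C) →
    pvZipStarGo C rows = (List.range C).map (fun x => rows.map (fun r => r.getD x ' ')) := by
  intro C
  induction C with
  | zero => intro rows _; simp [pvZipStarGo]
  | succ k ih =>
    intro rows hall
    simp only [pvZipStarGo]
    rw [if_pos]
    · rw [pvFilterHead rows (by
          intro r hr
          have h := hall r hr
          intro he
          rw [he] at h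
          simp at h),
        ih (rows.map List.tail) (by
          intro r hr
          rw [List.mem_map] at hr
          obtain ⟨r0, hr0, rfl⟩ := hr
          have h := hall r0 hr0
          cases r0 with
          | nil => simp at h
          | cons a t => simp only [List.length_cons] at h; simpa using h)]
      rw [List.range_succ_eq_map]
      simp [List.map_map, Function.comp_def]
    · rw [List.all_eq_true]
      intro r hr
      have h := hall r hr
      cases r with
      | nil => simp at h
      | cons a t => simp

lemma pvZipStar_eq (rows : List (List Char)) (C : Nat) (hne : rows ≠ [])
    (hall : ∀ r ∈ rows, r.length = C) :
    pvZipStar rows = (List.range C).map (fun x => rows.map (fun r => r.getD x ' ')) := by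
  rw [pvZipStar, if_neg (by simpa using hne)]
  have hhead : (rows.headD []).length = C := by
    cases rows with
    | nil => exact absurd rfl hne
    | cons a l => exact hall a List.mem_cons_self
  rw [hhead, pvZipStarGo_eq C rows hall]

lemma pvFree_get (park : List String) (y : Nat) (hy : y < park.length) :
    (pvFree park)[y]? = some ((park[y].toList).map (fun ch => ch != 'X')) := by
  simp [pvFree, List.getElem?_eq_getElem hy]

-- generic bridge: "m ≤ pvRun seq" is A's move condition, given what seq's entries mean
lemma pvRun_cond (park : List String) (seq : List Bool) (r c dr dc m : Int) (hm : 0 ≤ m)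
    (hb : m ≤ (seq.length : Int) ↔
      (0 ≤ r + dr * m ∧ r + dr * m < (park.length : Int) ∧ 0 ≤ c + dc * m ∧ c + dc * m < pvL park))
    (hcells : ∀ i : Nat, (i : Int) < m → i < seq.length →
      (seq[i]? = some true ↔ ¬ pvCell park (r + ((i : Int) + 1) * dr) (c + ((i : Int) + 1) * dc) = some 'X')) :
    (m ≤ pvRun seq ↔ pvCondA park r c dr dc m) := by
  rw [pvRun_le_iff seq m hm]
  unfold pvCondA
  constructor
  · rintro ⟨h1, h2⟩
    refine ⟨hb.mp h1, ?_⟩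
    intro i hi1 him
    have hiN : (((i - 1).toNat : Nat) : Int) = i - 1 := by omega
    have hlt : (((i - 1).toNat : Nat) : Int) < m := by omega
    have hlen : (i - 1).toNat < seq.length := by omega
    have := (hcells (i - 1).toNat hlt hlen).mp (h2 _ hlt)
    rw [hiN] at this
    have e1 : r + (i - 1 + 1) * dr = r + i * dr := by ring
    have e2 : c + (i - 1 + 1) * dc = c + i * dc := by ring
    rwa [e1, e2] at this
  · rintro ⟨h1, h2⟩
    have hlen := hb.mpr h1
    refine ⟨hlen, ?_⟩
    intro i hi
    refine (hcells i hi (by omega)).mpr ?_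
    have := h2 ((i : Int) + 1) (by omega) (by omega)
    have e1 : r + ((i : Int) + 1) * dr = r + ((i : Int) + 1) * dr := rfl
    exact this


-- cell ↔ free-table bridge: the free entry at (y,x) is true iff A's cell test passes there
lemma pvCellFree (park : List String) (hrect : ∀ s ∈ park, PySem.Str.len s = pvL park)
    (y x : Nat) (hy : y < park.length) (hx : (x : Int) < pvL park) :
    ((pvFree park)[y]?.map (fun r => r[x]?.getD false) = some true)
      ↔ ¬ pvCell park (y : Int) (x : Int) = some 'X' := by
  have hlen : ((park[y].toList.length : Nat) : Int) = pvL park := by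
    have h := hrect park[y] (List.getElem_mem hy); rwa [pvStrLen] at h
  have hxN : x < park[y].toList.length := by omega
  rw [pvFree_get park y hy]
  have hcell : pvCell park (y : Int) (x : Int) = some (park[y].toList[x]) := by
    rw [pvCell, PySem.List.pyGet?_natCast, List.getElem?_eq_getElem hy]
    simp [List.getElem?_eq_getElem hxN]
  rw [hcell]
  simp [List.getElem?_eq_getElem hxN, bne_iff_ne]

lemma pvRowsD_len (park : List String) (hrect : ∀ s ∈ park, PySem.Str.len s = pvL park) :
    ∀ r ∈ pvRowsD park, r.length = (pvL park).toNat := by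
  intro r hr
  rw [pvRowsD, List.mem_map] at hr
  obtain ⟨row, hrow, rfl⟩ := hr
  have h := hrect row hrow
  rw [pvStrLen] at h
  omega

-- the x-th free column equals the x-th entries of the zip(*rows) transpose, as Bools
lemma pvColPred (park : List String) (hrect : ∀ s ∈ park, PySem.Str.len s = pvL park)
    (x : Nat) (hx : (x : Int) < pvL park) :
    ((pvRowsD park).map (fun r => r.getD x ' ')).map (fun ch => ch != 'X')
      = pvStk (pvFree park) x := by
  apply List.ext_getElem
  · simp [pvRowsD, pvStk, pvFree]
  · intro y h1 h2
    have hy : y < park.length := by simpa [pvRowsD] using h1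
    have hlen : ((park[y].toList.length : Nat) : Int) = pvL park := by
      have h := hrect park[y] (List.getElem_mem hy); rwa [pvStrLen] at h
    have hxN : x < park[y].toList.length := by omega
    simp only [pvStk, pvFree, pvRowsD, List.getElem_map, List.map_map]
    simp [List.getD_eq_getElem?_getD,
      List.getElem?_eq_getElem hxN,
      List.getElem?_eq_getElem (by simpa using hxN : x < (park[y].toList.map (fun ch => ch != 'X')).length)]

lemma pvColsD_get (park : List String) (hrect : ∀ s ∈ park, PySem.Str.len s = pvL park)
    (hne : park ≠ []) (x : Nat) (hx : (x : Int) < pvL park) :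
    (pvColsD park)[x]? = some ((pvRowsD park).map (fun r => r.getD x ' ')) := by
  rw [pvColsD, pvZipStar_eq (pvRowsD park) (pvL park).toNat
    (by simpa [pvRowsD] using hne) (pvRowsD_len park hrect)]
  rw [List.getElem?_map]
  rw [List.getElem?_eq_getElem (by simp; omega)]
  simp [List.getElem_range]

-- east[r][c] = pvRun of the free cells after column c in row r
lemma pvEastB_val (park : List String) (hrect : ∀ s ∈ park, PySem.Str.len s = pvL park)
    (r c : Nat) (hr : r < park.length) (hc : (c : Int) < pvL park) :
    (PySem.List.pyGet? (pvEastB park) (r : Int)).bind (fun row => PySem.List.pyGet? row (c : Int))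
      = some (pvRun ((park[r].toList.map (fun ch => ch != 'X')).drop (c + 1))) := by
  have hlen : ((park[r].toList.length : Nat) : Int) = pvL park := by
    have h := hrect park[r] (List.getElem_mem hr); rwa [pvStrLen] at h
  have hcN : c < park[r].toList.length := by omega
  have h1 : PySem.List.pyGet? (pvEastB park) (r : Int) = some (pvRuns park[r].toList) := by
    rw [PySem.List.pyGet?_natCast, pvEastB, pvRowsD, List.map_map, List.getElem?_map,
      List.getElem?_eq_getElem hr]
    rfl
  rw [h1]
  show PySem.List.pyGet? (pvRuns park[r].toList) (c : Int) = _
  rw [PySem.List.pyGet?_natCast, pvRuns_get park[r].toList c hcN]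

-- west[r][c] = pvRun of the free cells before column c in row r, nearest first
lemma pvWestB_val (park : List String) (hrect : ∀ s ∈ park, PySem.Str.len s = pvL park)
    (r c : Nat) (hr : r < park.length) (hc : (c : Int) < pvL park) :
    (PySem.List.pyGet? (pvWestB park) (r : Int)).bind (fun row => PySem.List.pyGet? row (c : Int))
      = some (pvRun (((park[r].toList.map (fun ch => ch != 'X')).take c).reverse)) := by
  have hlen : ((park[r].toList.length : Nat) : Int) = pvL park := by
    have h := hrect park[r] (List.getElem_mem hr); rwa [pvStrLen] at h
  have hcN : c < park[r].toList.length := by omega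
  have h1 : PySem.List.pyGet? (pvWestB park) (r : Int)
      = some ((pvRuns park[r].toList.reverse).reverse) := by
    rw [PySem.List.pyGet?_natCast, pvWestB, pvRowsD, List.map_map, List.getElem?_map,
      List.getElem?_eq_getElem hr]
    rfl
  rw [h1]
  show PySem.List.pyGet? ((pvRuns park[r].toList.reverse).reverse) (c : Int) = _
  rw [PySem.List.pyGet?_natCast, pvRunsRev_get park[r].toList c hcN]

-- north[r][c] = pvRun of the free cells above row r in column c, nearest first
lemma pvNorthB_val (park : List String) (hrect : ∀ s ∈ park, PySem.Str.len s = pvL park)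
    (r c : Nat) (hr : r < park.length) (hc : (c : Int) < pvL park) :
    (PySem.List.pyGet? (pvNorthB park) (r : Int)).bind (fun row => PySem.List.pyGet? row (c : Int))
      = some (pvRun (pvStk (((pvFree park).take r).reverse) c)) := by
  have hcol := pvColsD_get park hrect (by intro h; rw [h] at hr; simp at hr) c hc
  have hclen : ((pvRowsD park).map (fun r => r.getD c ' ')).length = park.length := by
    simp [pvRowsD]
  have h1 : PySem.List.pyGet? (pvNorthB park) (r : Int)
      = some ((pvNorthTB park).map (fun col => col.getD r 0)) := by
    rw [PySem.List.pyGet?_natCast, pvNorthB, List.getElem?_map]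
    rw [List.getElem?_eq_getElem (by simpa using hr)]
    simp [List.getElem_range]
  rw [h1]
  show PySem.List.pyGet? ((pvNorthTB park).map (fun col => col.getD r 0)) (c : Int) = _
  rw [PySem.List.pyGet?_natCast, List.getElem?_map, pvNorthTB, List.getElem?_map, hcol]
  simp only [Option.map_some]
  have hv := pvRunsRev_get ((pvRowsD park).map (fun r => r.getD c ' ')) r (by rw [hclen]; exact hr)
  rw [List.getD_eq_getElem?_getD, hv]
  simp only [Option.getD_some, Option.some_inj]
  rw [pvColPred park hrect c hc]
  simp only [pvStk]
  rw [List.map_reverse, List.map_take]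

-- south[r][c] = pvRun of the free cells below row r in column c
lemma pvSouthB_val (park : List String) (hrect : ∀ s ∈ park, PySem.Str.len s = pvL park)
    (r c : Nat) (hr : r < park.length) (hc : (c : Int) < pvL park) :
    (PySem.List.pyGet? (pvSouthB park) (r : Int)).bind (fun row => PySem.List.pyGet? row (c : Int))
      = some (pvRun (pvStk ((pvFree park).drop (r + 1)) c)) := by
  have hcol := pvColsD_get park hrect (by intro h; rw [h] at hr; simp at hr) c hc
  have hclen : ((pvRowsD park).map (fun r => r.getD c ' ')).length = park.length := by
    simp [pvRowsD]
  have h1 : PySem.List.pyGet? (pvSouthB park) (r : Int)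
      = some ((pvSouthTB park).map (fun col => col.getD r 0)) := by
    rw [PySem.List.pyGet?_natCast, pvSouthB, List.getElem?_map]
    rw [List.getElem?_eq_getElem (by simpa using hr)]
    simp [List.getElem_range]
  rw [h1]
  show PySem.List.pyGet? ((pvSouthTB park).map (fun col => col.getD r 0)) (c : Int) = _
  rw [PySem.List.pyGet?_natCast, List.getElem?_map, pvSouthTB, List.getElem?_map, hcol]
  simp only [Option.map_some]
  have hv := pvRuns_get ((pvRowsD park).map (fun r => r.getD c ' ')) r (by rw [hclen]; exact hr)
  rw [List.getD_eq_getElem?_getD, hv]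
  simp only [Option.getD_some, Option.some_inj]
  rw [pvColPred park hrect c hc]
  simp only [pvStk]
  rw [List.map_drop]

lemma pvReachE (park : List String) (hrect : ∀ s ∈ park, PySem.Str.len s = pvL park)
    (r c : Nat) (hr : r < park.length) (hc : (c : Int) < pvL park) (m : Int) (hm : 0 ≤ m) :
    ∃ v, (PySem.List.pyGet? (pvEastB park) (r : Int)).bind
           (fun row => PySem.List.pyGet? row (c : Int)) = some v ∧
         (m ≤ v ↔ pvCondA park (r : Int) (c : Int) 0 1 m) := by
  have hlen : ((park[r].toList.length : Nat) : Int) = pvL park := by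
    have h := hrect park[r] (List.getElem_mem hr); rwa [pvStrLen] at h
  have hcN : c < park[r].toList.length := by omega
  have hfr : (pvFree park)[r]? = some ((park[r].toList).map (fun ch => ch != 'X')) :=
    pvFree_get park r hr
  have hlrow : ((park[r].toList).map (fun ch => ch != 'X')).length = park[r].toList.length := by simp
  refine ⟨_, pvEastB_val park hrect r c hr hc, ?_⟩
  apply pvRun_cond park _ _ _ 0 1 m hm
  · have hdlen : ((((park[r].toList).map (fun ch => ch != 'X')).drop (c + 1)).length : Int)
        = pvL park - c - 1 := by
      simp only [List.length_drop, hlrow]; omega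
    rw [hdlen]
    simp only [zero_mul, add_zero, one_mul]
    omega
  · intro i hiI hiLen
    have hin : c + 1 + i < park[r].toList.length := by
      simp only [List.length_drop, hlrow] at hiLen; omega
    have hin' : c + 1 + i < ((park[r].toList).map (fun ch => ch != 'X')).length := by
      rw [hlrow]; exact hin
    have hseq : (((park[r].toList).map (fun ch => ch != 'X')).drop (c + 1))[i]?
        = (pvFree park)[r]?.map (fun row => row[c + 1 + i]?.getD false) := by
      rw [List.getElem?_drop, hfr]
      simp [List.getElem?_eq_getElem hin']
    have hidx1 : (r : Int) + ((i : Int) + 1) * 0 = ((r : Nat) : Int) := by ring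
    have hidx2 : (c : Int) + ((i : Int) + 1) * 1 = ((c + 1 + i : Nat) : Int) := by push_cast; ring
    rw [hseq, hidx1, hidx2]
    exact pvCellFree park hrect r (c + 1 + i) hr (by omega)

lemma pvReachW (park : List String) (hrect : ∀ s ∈ park, PySem.Str.len s = pvL park)
    (r c : Nat) (hr : r < park.length) (hc : (c : Int) < pvL park) (m : Int) (hm : 0 ≤ m) :
    ∃ v, (PySem.List.pyGet? (pvWestB park) (r : Int)).bind
           (fun row => PySem.List.pyGet? row (c : Int)) = some v ∧
         (m ≤ v ↔ pvCondA park (r : Int) (c : Int) 0 (-1) m) := by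
  have hlen : ((park[r].toList.length : Nat) : Int) = pvL park := by
    have h := hrect park[r] (List.getElem_mem hr); rwa [pvStrLen] at h
  have hcN : c < park[r].toList.length := by omega
  have hfr : (pvFree park)[r]? = some ((park[r].toList).map (fun ch => ch != 'X')) :=
    pvFree_get park r hr
  have hlrow : ((park[r].toList).map (fun ch => ch != 'X')).length = park[r].toList.length := by simp
  refine ⟨_, pvWestB_val park hrect r c hr hc, ?_⟩
  apply pvRun_cond park _ _ _ 0 (-1) m hm
  · have hdlen : (((((park[r].toList).map (fun ch => ch != 'X')).take c).reverse).length : Int)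
        = (c : Int) := by
      rw [List.length_reverse, List.length_take, hlrow]
      omega
    rw [hdlen]
    have e : (c : Int) + (-1) * m = (c : Int) - m := by ring
    simp only [zero_mul, add_zero, e]
    omega
  · intro i hiI hiLen
    have hic : i < c := by
      rw [List.length_reverse, List.length_take, hlrow] at hiLen
      omega
    have htlen : (((park[r].toList).map (fun ch => ch != 'X')).take c).length = c := by
      rw [List.length_take, hlrow]
      omega
    have hseq : ((((park[r].toList).map (fun ch => ch != 'X')).take c).reverse)[i]?
        = (pvFree park)[r]?.map (fun row => row[c - 1 - i]?.getD false) := by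
      rw [List.getElem?_reverse (by omega), htlen, List.getElem?_take_of_lt (by omega), hfr]
      have hin' : c - 1 - i < ((park[r].toList).map (fun ch => ch != 'X')).length := by
        rw [hlrow]; omega
      simp [List.getElem?_eq_getElem hin']
    have hidx1 : (r : Int) + ((i : Int) + 1) * 0 = ((r : Nat) : Int) := by ring
    have hidx2 : (c : Int) + ((i : Int) + 1) * (-1) = ((c - 1 - i : Nat) : Int) := by omega
    rw [hseq, hidx1, hidx2]
    exact pvCellFree park hrect r (c - 1 - i) hr (by omega)

lemma pvReachN (park : List String) (hrect : ∀ s ∈ park, PySem.Str.len s = pvL park)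
    (r c : Nat) (hr : r < park.length) (hc : (c : Int) < pvL park) (m : Int) (hm : 0 ≤ m) :
    ∃ v, (PySem.List.pyGet? (pvNorthB park) (r : Int)).bind
           (fun row => PySem.List.pyGet? row (c : Int)) = some v ∧
         (m ≤ v ↔ pvCondA park (r : Int) (c : Int) (-1) 0 m) := by
  have hfl : (pvFree park).length = park.length := by simp [pvFree]
  refine ⟨_, pvNorthB_val park hrect r c hr hc, ?_⟩
  apply pvRun_cond park _ _ _ (-1) 0 m hm
  · have hdlen : ((pvStk (((pvFree park).take r).reverse) c).length : Int) = (r : Int) := by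
      rw [pvStk, List.length_map, List.length_reverse, List.length_take, hfl]
      omega
    rw [hdlen]
    have e : (r : Int) + (-1) * m = (r : Int) - m := by ring
    simp only [zero_mul, add_zero, e]
    omega
  · intro i hiI hiLen
    have hir : i < r := by
      rw [pvStk, List.length_map, List.length_reverse, List.length_take, hfl] at hiLen
      omega
    have htlen : ((pvFree park).take r).length = r := by
      rw [List.length_take, hfl]
      omega
    have hseq : (pvStk (((pvFree park).take r).reverse) c)[i]?
        = (pvFree park)[r - 1 - i]?.map (fun row => row[c]?.getD false) := by
      rw [pvStk, List.getElem?_map, List.getElem?_reverse (by omega), htlen,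
          List.getElem?_take_of_lt (by omega)]
    have hidx1 : (r : Int) + ((i : Int) + 1) * (-1) = ((r - 1 - i : Nat) : Int) := by omega
    have hidx2 : (c : Int) + ((i : Int) + 1) * 0 = ((c : Nat) : Int) := by ring
    rw [hseq, hidx1, hidx2]
    exact pvCellFree park hrect (r - 1 - i) c (by omega) hc

lemma pvReachS (park : List String) (hrect : ∀ s ∈ park, PySem.Str.len s = pvL park)
    (r c : Nat) (hr : r < park.length) (hc : (c : Int) < pvL park) (m : Int) (hm : 0 ≤ m) :
    ∃ v, (PySem.List.pyGet? (pvSouthB park) (r : Int)).bind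
           (fun row => PySem.List.pyGet? row (c : Int)) = some v ∧
         (m ≤ v ↔ pvCondA park (r : Int) (c : Int) 1 0 m) := by
  have hfl : (pvFree park).length = park.length := by simp [pvFree]
  refine ⟨_, pvSouthB_val park hrect r c hr hc, ?_⟩
  apply pvRun_cond park _ _ _ 1 0 m hm
  · have hdlen : ((pvStk ((pvFree park).drop (r + 1)) c).length : Int)
        = (park.length : Int) - r - 1 := by
      rw [pvStk, List.length_map, List.length_drop, hfl]
      omega
    rw [hdlen]
    simp only [zero_mul, add_zero, one_mul]
    omega
  · intro i hiI hiLen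
    have hirn : r + 1 + i < park.length := by
      rw [pvStk, List.length_map, List.length_drop, hfl] at hiLen
      omega
    have hseq : (pvStk ((pvFree park).drop (r + 1)) c)[i]?
        = (pvFree park)[r + 1 + i]?.map (fun row => row[c]?.getD false) := by
      rw [pvStk, List.getElem?_map, List.getElem?_drop]
    have hidx1 : (r : Int) + ((i : Int) + 1) * 1 = ((r + 1 + i : Nat) : Int) := by push_cast; ring
    have hidx2 : (c : Int) + ((i : Int) + 1) * 0 = ((c : Nat) : Int) := by ring
    rw [hseq, hidx1, hidx2]
    exact pvCellFree park hrect (r + 1 + i) c hirn hc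

lemma pvDigit (c2 : Char)
    (h : c2 = '0' ∨ c2 = '1' ∨ c2 = '2' ∨ c2 = '3' ∨ c2 = '4' ∨ c2 = '5' ∨ c2 = '6' ∨ c2 = '7' ∨ c2 = '8' ∨ c2 = '9') :
    ∃ m : Int, PySem.Int.ofChars? [c2] = some m ∧ 0 ≤ m := by
  rcases h with rfl | rfl | rfl | rfl | rfl | rfl | rfl | rfl | rfl | rfl
  exacts [⟨0, by decide, by decide⟩, ⟨1, by decide, by decide⟩, ⟨2, by decide, by decide⟩,
    ⟨3, by decide, by decide⟩, ⟨4, by decide, by decide⟩, ⟨5, by decide, by decide⟩,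
    ⟨6, by decide, by decide⟩, ⟨7, by decide, by decide⟩, ⟨8, by decide, by decide⟩,
    ⟨9, by decide, by decide⟩]

lemma pvDir_N : PySem.Dict.get? pvDirDict 'N' = some ((-1 : Int), (0 : Int)) := by decide
lemma pvDir_S : PySem.Dict.get? pvDirDict 'S' = some ((1 : Int), (0 : Int)) := by decide
lemma pvDir_W : PySem.Dict.get? pvDirDict 'W' = some ((0 : Int), (-1 : Int)) := by decide
lemma pvDir_E : PySem.Dict.get? pvDirDict 'E' = some ((0 : Int), (1 : Int)) := by decide
lemma pvDelta_N : PySem.Dict.get? pvDeltaDict 'N' = some ((-1 : Int), (0 : Int)) := by decide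
lemma pvDelta_S : PySem.Dict.get? pvDeltaDict 'S' = some ((1 : Int), (0 : Int)) := by decide
lemma pvDelta_W : PySem.Dict.get? pvDeltaDict 'W' = some ((0 : Int), (-1 : Int)) := by decide
lemma pvDelta_E : PySem.Dict.get? pvDeltaDict 'E' = some ((0 : Int), (1 : Int)) := by decide

lemma pvReachN_get (park : List String) :
    PySem.Dict.get? (pvReach park) 'N' = some (pvNorthB park) := by
  simp only [pvReach]
  rw [PySem.Dict.get?_insert_of_ne, PySem.Dict.get?_insert_of_ne,
    PySem.Dict.get?_insert_of_ne, PySem.Dict.get?_insert_self]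
  all_goals first | rfl | decide

lemma pvReachS_get (park : List String) :
    PySem.Dict.get? (pvReach park) 'S' = some (pvSouthB park) := by
  simp only [pvReach]
  rw [PySem.Dict.get?_insert_of_ne, PySem.Dict.get?_insert_of_ne, PySem.Dict.get?_insert_self]
  all_goals first | rfl | decide

lemma pvReachW_get (park : List String) :
    PySem.Dict.get? (pvReach park) 'W' = some (pvWestB park) := by
  simp only [pvReach]
  rw [PySem.Dict.get?_insert_of_ne, PySem.Dict.get?_insert_self]
  all_goals first | rfl | decide

lemma pvReachE_get (park : List String) :
    PySem.Dict.get? (pvReach park) 'E' = some (pvEastB park) := by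
  simp only [pvReach]
  rw [PySem.Dict.get?_insert_self]
  rfl

lemma pvHall (park : List String) (r c dr dc m : Int) :
    (((PySem.List.pyRange 1 (m + 1) 1).all
        (fun i => !(pvCell park (r + i * dr) (c + i * dc) == some 'X'))) = true)
      ↔ ∀ i : Int, 1 ≤ i → i ≤ m → ¬ pvCell park (r + i * dr) (c + i * dc) = some 'X' := by
  simp [List.all_eq_true, PySem.List.mem_pyRange_one]

lemma pvStepA_pos (park : List String) (rc : Int × Int) (route : String) (dr dc m : Int)
    (hp : pvParseA route = some ((dr, dc), m)) (hc : pvCondA park rc.1 rc.2 dr dc m) :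
    pvStepA park rc route = (rc.1 + dr * m, rc.2 + dc * m) := by
  obtain ⟨hb, hcells⟩ := hc
  rw [← PySem.List.len_eq] at hb
  simp only [pvStepA, hp]
  rw [if_pos hb, if_pos ((pvHall park rc.1 rc.2 dr dc m).mpr hcells)]

lemma pvStepA_neg (park : List String) (rc : Int × Int) (route : String) (dr dc m : Int)
    (hp : pvParseA route = some ((dr, dc), m)) (hc : ¬ pvCondA park rc.1 rc.2 dr dc m) :
    pvStepA park rc route = rc := by
  simp only [pvStepA, hp]
  by_cases hb : (0 ≤ rc.1 + dr * m ∧ rc.1 + dr * m < PySem.List.len park ∧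
      0 ≤ rc.2 + dc * m ∧ rc.2 + dc * m < pvL park)
  · rw [if_pos hb]
    rw [PySem.List.len_eq] at hb
    rw [if_neg (fun h => hc ⟨hb, (pvHall park rc.1 rc.2 dr dc m).mp h⟩)]
  · rw [if_neg hb]

lemma pvStep_eq (park : List String) (rc : Int × Int) (route : String)
    (hrect : ∀ s ∈ park, PySem.Str.len s = pvL park)
    (h3 : 3 ≤ route.toList.length)
    (h0 : route.toList[0]?.getD ' ' ∈ (['N', 'S', 'W', 'E'] : List Char))
    (h2 : route.toList[2]?.getD ' ' ∈ (['0','1','2','3','4','5','6','7','8','9'] : List Char))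
    (hinv : pvInv park rc) :
    pvStepB (pvReach park) rc route = pvStepA park rc route ∧ pvInv park (pvStepA park rc route) := by
  obtain ⟨r, c⟩ := rc
  obtain ⟨hr0, hrn, hc0, hcn⟩ := hinv
  obtain ⟨rN, hrN⟩ : ∃ n : Nat, r = (n : Int) := ⟨r.toNat, (Int.toNat_of_nonneg hr0).symm⟩
  obtain ⟨cN, hcN⟩ : ∃ n : Nat, c = (n : Int) := ⟨c.toNat, (Int.toNat_of_nonneg hc0).symm⟩
  subst hrN
  subst hcN
  have hrNlt : rN < park.length := by omega
  have hcNlt : (cN : Int) < pvL park := hcn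
  rcases hcs : route.toList with _ | ⟨c0, _ | ⟨c1, _ | ⟨c2, rest⟩⟩⟩ <;>
    rw [hcs] at h3 h0 h2 <;> simp at h3 h0 h2
  obtain ⟨m, hmEq, hm0⟩ := pvDigit c2 h2
  have hg0 : PySem.Str.pyGet? route 0 = some c0 := by
    simp only [PySem.Str.pyGet?_eq, PySem.Chars.pyGet?_eq_listPyGet?, hcs, PySem.List.pyGet?_zero_cons]
  have hg2 : PySem.Str.pyGet? route 2 = some c2 := by
    simp only [PySem.Str.pyGet?_eq, PySem.Chars.pyGet?_eq_listPyGet?, hcs, pvGet2]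
  rcases h0 with rfl | rfl | rfl | rfl
  · -- 'N'
    have hpA : pvParseA route = some ((((-1 : Int), (0 : Int))), m) := by
      simp only [pvParseA, hg0, hg2, pvDir_N, hmEq]
    obtain ⟨v, hv, hiff⟩ := pvReachN park hrect rN cN hrNlt hcNlt m hm0
    have hBt : pvStepB (pvReach park) ((rN : Int), (cN : Int)) route
        = if m ≤ v then ((rN : Int) + (-1) * m, (cN : Int) + 0 * m) else ((rN : Int), (cN : Int)) := by
      simp only [pvStepB, hg0, hg2, hmEq, pvReachN_get, pvDelta_N]
      rw [hv]
    by_cases hcond : pvCondA park (rN : Int) (cN : Int) (-1) 0 m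
    · have hA := pvStepA_pos park ((rN : Int), (cN : Int)) route (-1) 0 m hpA hcond
      rw [hBt, hA, if_pos (hiff.mpr hcond)]
      exact ⟨rfl, hcond.1.1, hcond.1.2.1, hcond.1.2.2.1, hcond.1.2.2.2⟩
    · have hA := pvStepA_neg park ((rN : Int), (cN : Int)) route (-1) 0 m hpA hcond
      rw [hBt, hA, if_neg (fun h => hcond (hiff.mp h))]
      exact ⟨rfl, hr0, hrn, hc0, hcn⟩
  · -- 'S'
    have hpA : pvParseA route = some ((((1 : Int), (0 : Int))), m) := by
      simp only [pvParseA, hg0, hg2, pvDir_S, hmEq]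
    obtain ⟨v, hv, hiff⟩ := pvReachS park hrect rN cN hrNlt hcNlt m hm0
    have hBt : pvStepB (pvReach park) ((rN : Int), (cN : Int)) route
        = if m ≤ v then ((rN : Int) + 1 * m, (cN : Int) + 0 * m) else ((rN : Int), (cN : Int)) := by
      simp only [pvStepB, hg0, hg2, hmEq, pvReachS_get, pvDelta_S]
      rw [hv]
    by_cases hcond : pvCondA park (rN : Int) (cN : Int) 1 0 m
    · have hA := pvStepA_pos park ((rN : Int), (cN : Int)) route 1 0 m hpA hcond
      rw [hBt, hA, if_pos (hiff.mpr hcond)]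
      exact ⟨rfl, hcond.1.1, hcond.1.2.1, hcond.1.2.2.1, hcond.1.2.2.2⟩
    · have hA := pvStepA_neg park ((rN : Int), (cN : Int)) route 1 0 m hpA hcond
      rw [hBt, hA, if_neg (fun h => hcond (hiff.mp h))]
      exact ⟨rfl, hr0, hrn, hc0, hcn⟩
  · -- 'W'
    have hpA : pvParseA route = some ((((0 : Int), (-1 : Int))), m) := by
      simp only [pvParseA, hg0, hg2, pvDir_W, hmEq]
    obtain ⟨v, hv, hiff⟩ := pvReachW park hrect rN cN hrNlt hcNlt m hm0
    have hBt : pvStepB (pvReach park) ((rN : Int), (cN : Int)) route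
        = if m ≤ v then ((rN : Int) + 0 * m, (cN : Int) + (-1) * m) else ((rN : Int), (cN : Int)) := by
      simp only [pvStepB, hg0, hg2, hmEq, pvReachW_get, pvDelta_W]
      rw [hv]
    by_cases hcond : pvCondA park (rN : Int) (cN : Int) 0 (-1) m
    · have hA := pvStepA_pos park ((rN : Int), (cN : Int)) route 0 (-1) m hpA hcond
      rw [hBt, hA, if_pos (hiff.mpr hcond)]
      exact ⟨rfl, hcond.1.1, hcond.1.2.1, hcond.1.2.2.1, hcond.1.2.2.2⟩
    · have hA := pvStepA_neg park ((rN : Int), (cN : Int)) route 0 (-1) m hpA hcond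
      rw [hBt, hA, if_neg (fun h => hcond (hiff.mp h))]
      exact ⟨rfl, hr0, hrn, hc0, hcn⟩
  · -- 'E'
    have hpA : pvParseA route = some ((((0 : Int), (1 : Int))), m) := by
      simp only [pvParseA, hg0, hg2, pvDir_E, hmEq]
    obtain ⟨v, hv, hiff⟩ := pvReachE park hrect rN cN hrNlt hcNlt m hm0
    have hBt : pvStepB (pvReach park) ((rN : Int), (cN : Int)) route
        = if m ≤ v then ((rN : Int) + 0 * m, (cN : Int) + 1 * m) else ((rN : Int), (cN : Int)) := by
      simp only [pvStepB, hg0, hg2, hmEq, pvReachE_get, pvDelta_E]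
      rw [hv]
    by_cases hcond : pvCondA park (rN : Int) (cN : Int) 0 1 m
    · have hA := pvStepA_pos park ((rN : Int), (cN : Int)) route 0 1 m hpA hcond
      rw [hBt, hA, if_pos (hiff.mpr hcond)]
      exact ⟨rfl, hcond.1.1, hcond.1.2.1, hcond.1.2.2.1, hcond.1.2.2.2⟩
    · have hA := pvStepA_neg park ((rN : Int), (cN : Int)) route 0 1 m hpA hcond
      rw [hBt, hA, if_neg (fun h => hcond (hiff.mp h))]
      exact ⟨rfl, hr0, hrn, hc0, hcn⟩

lemma pvFold_eq (park : List String) (hrect : ∀ s ∈ park, PySem.Str.len s = pvL park) :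
    ∀ (routes : List String) (rc : Int × Int),
      (∀ route ∈ routes,
        3 ≤ route.toList.length ∧
        route.toList[0]?.getD ' ' ∈ (['N', 'S', 'W', 'E'] : List Char) ∧
        route.toList[2]?.getD ' ' ∈ (['0','1','2','3','4','5','6','7','8','9'] : List Char)) →
      pvInv park rc →
      routes.foldl (pvStepB (pvReach park)) rc = routes.foldl (pvStepA park) rc := by
  intro routes
  induction routes with
  | nil => intro rc _ _; rfl
  | cons route rest ih =>
    intro rc hall hinv
    obtain ⟨hr1, hr2, hr3⟩ := hall route List.mem_cons_self
    obtain ⟨hstep, hinv'⟩ := pvStep_eq park rc route hrect hr1 hr2 hr3 hinv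
    simp only [List.foldl_cons]
    rw [hstep]
    exact ih _ (fun r hr => hall r (List.mem_cons_of_mem _ hr)) hinv'

-- ===== VERDICT (by name: the statement is the Claim_ definition above) =====
theorem solution_spec : Claim_equal_solution := by
  intro park routes _hdom hpre
  obtain ⟨hroutes, hdisj⟩ := hpre
  unfold Spec_solution solution solution_alt
  rcases routes with _ | ⟨route0, rest⟩
  · rfl
  · rcases hdisj with h | ⟨hne, hrect, hC⟩
    · exact absurd h (by simp)
    · have hR : 0 < park.length := by
        cases park with
        | nil => exact absurd rfl hne
        | cons a l => simp
      have hinv0 : pvInv park ((0 : Int), (0 : Int)) :=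
        ⟨le_refl _, by push_cast; omega, le_refl _, hC⟩
      have hinvS : pvInv park (pvStartScan park 0 (0, 0)) :=
        pvStartScan_inv park park 0 (0, 0) hrect (le_refl _) (by simp) hinv0
      simp only []
      rw [pvFold_eq park hrect (route0 :: rest) _ hroutes hinvS]
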